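-- pv_equiv track=rewrite | github.com/Jeongseunghun/PS_algorithm | 프로그래머스/2/42586. 기능개발/기능개발.py | solution
-- ===== SOURCE A (Python) =====
-- def solution(progresses, speeds):
--     ans = []
--     lst = []
--
--     for p,s in zip(progresses,speeds):
--         if (100-p) % s == 0:
--             lst.append((100-p) // s)
--         else:
--             lst.append((100-p) // s + 1)
--
--     start = lst.pop(0)
--     cnt = 1
--     while lst:
--         tmp = lst.pop(0)
--         if start < tmp:
--             ans.append(cnt)
--             cnt = 1
--             start = tmp
--         else:
--             cnt += 1
--
--     ans.append(cnt)
--     return ans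
-- ===== SOURCE B (Python) =====
-- def solution(progresses, speeds):
--     days = [(100 - p) // s if (100 - p) % s == 0 else (100 - p) // s + 1
--             for p, s in zip(progresses, speeds)]
--     bounds = []
--     m = None
--     i = 0
--     for d in days:
--         if m is None or d > m:
--             bounds.append(i)
--             m = d
--         i += 1
--     bounds.append(i)
--     return [b - a for a, b in zip(bounds, bounds[1:])]
-- ===== Notes on version B (the rewrite author's own statement) =====
-- stated objective: faster
-- what changed: B keeps A's integer-ceil day computation but replaces the destructive pop(0)/start/cnt while-loop (each pop(0) shifts the whole list) by a single indexed pass that records the boundary indices where the day value exceeds the running maximum, returning consecutive differences of those boundaries.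
import Mathlib
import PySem

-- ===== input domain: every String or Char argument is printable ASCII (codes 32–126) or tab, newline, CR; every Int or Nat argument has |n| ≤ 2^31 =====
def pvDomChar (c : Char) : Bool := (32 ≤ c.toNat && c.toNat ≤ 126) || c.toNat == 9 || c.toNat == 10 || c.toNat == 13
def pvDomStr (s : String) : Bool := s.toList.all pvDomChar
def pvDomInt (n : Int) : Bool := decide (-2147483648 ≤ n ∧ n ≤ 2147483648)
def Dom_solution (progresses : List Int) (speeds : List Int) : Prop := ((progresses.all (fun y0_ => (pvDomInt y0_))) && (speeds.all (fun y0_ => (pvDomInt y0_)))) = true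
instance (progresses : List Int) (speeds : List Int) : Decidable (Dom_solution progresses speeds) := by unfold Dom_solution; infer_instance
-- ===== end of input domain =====

-- B replaces A's destructive pop(0)/start/cnt while-loop by one indexed pass collecting boundary
-- indices (a new group starts where the day value exceeds the running maximum) and returns their
-- consecutive differences; objective: faster (A's pop(0) loop is quadratic, B is one linear pass).

-- ===== PORT A =====
-- the while-loop of A: state (ans, start, cnt), popping from the front of lst
def solLoop (ans : List Int) (start : Int) (cnt : Int) (lst : List Int) : List Int :=
  match lst with
  | [] => ans ++ [cnt]
  | tmp :: rest =>
    if start < tmp then solLoop (ans ++ [cnt]) tmp 1 rest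
    else solLoop ans start (cnt + 1) rest

def solution (progresses : List Int) (speeds : List Int) : List Int :=
  match (List.zip progresses speeds).foldl
    (fun lst ps =>
      if PySem.Int.mod (100 - ps.1) ps.2 = 0 then lst ++ [PySem.Int.floordiv (100 - ps.1) ps.2]
      else lst ++ [PySem.Int.floordiv (100 - ps.1) ps.2 + 1]) [] with
  | [] => []   -- Python: lst.pop(0) raises IndexError here; excluded by Pre_solution
  | start :: rest => solLoop [] start 1 rest

-- ===== PORT B =====
-- B's loop body: state (bounds, m, i); m = none models Python's m is None
def bStep (st : List Int × Option Int × Int) (d : Int) : List Int × Option Int × Int :=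
  match st.2.1 with
  | none => (st.1 ++ [st.2.2], some d, st.2.2 + 1)
  | some m => if d > m then (st.1 ++ [st.2.2], some d, st.2.2 + 1) else (st.1, some m, st.2.2 + 1)

-- [b - a for a, b in zip(bounds, bounds[1:])] — Python's bounds[1:] is exactly drop 1
def boundsDiffs (bounds : List Int) : List Int :=
  (List.zip bounds (bounds.drop 1)).map (fun ab => ab.2 - ab.1)

def altAssemble (st : List Int × Option Int × Int) : List Int :=
  boundsDiffs (st.1 ++ [st.2.2])   -- bounds.append(i) then the diff comprehension

def solution_alt (progresses : List Int) (speeds : List Int) : List Int :=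
  altAssemble (((List.zip progresses speeds).map
    (fun ps =>
      if PySem.Int.mod (100 - ps.1) ps.2 = 0 then PySem.Int.floordiv (100 - ps.1) ps.2
      else PySem.Int.floordiv (100 - ps.1) ps.2 + 1)).foldl bStep ([], none, 0))

-- ===== PRECONDITION & SPEC =====
-- Pre_ excludes exactly the inputs where A raises: an empty zip (lst.pop(0) → IndexError) and a
-- zero speed among the zipped pairs (ZeroDivisionError).
def Pre_solution (progresses : List Int) (speeds : List Int) : Prop :=
  progresses ≠ [] ∧ speeds ≠ [] ∧ ∀ pr ∈ List.zip progresses speeds, pr.2 ≠ 0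
instance (progresses : List Int) (speeds : List Int) : Decidable (Pre_solution progresses speeds) := by
  unfold Pre_solution; infer_instance
def pvWitness_solution : List Int × List Int := ([93, 30, 55], [1, 30, 5])

def Spec_solution (progresses : List Int) (speeds : List Int) (out : List Int) : Prop := out = solution_alt progresses speeds
instance (progresses : List Int) (speeds : List Int) (out : List Int) : Decidable (Spec_solution progresses speeds out) := by unfold Spec_solution; infer_instance

-- ===== CLAIM (what is proved, stated in full; the proofs are below) =====
def Claim_equal_solution : Prop := ∀ (progresses : List Int) (speeds : List Int), Dom_solution progresses speeds → Pre_solution progresses speeds → Spec_solution progresses speeds (solution progresses speeds)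

-- ===== LEMMAS AND PROOFS =====

-- common reference: the run lengths, as A's loop computes them
def runs (m : Int) (c : Int) (l : List Int) : List Int :=
  match l with
  | [] => [c]
  | t :: r => if m < t then c :: runs t 1 r else runs m (c + 1) r

-- B's boundary indices from position j with running max m
def gIdx (j : Int) (m : Int) (l : List Int) : List Int :=
  match l with
  | [] => []
  | t :: r => if t > m then j :: gIdx (j + 1) t r else gIdx (j + 1) m r

theorem solLoop_eq_runs (l : List Int) : ∀ (ans : List Int) (m c : Int),
    solLoop ans m c l = ans ++ runs m c l := by
  induction l with
  | nil => intro ans m c; simp [solLoop, runs]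
  | cons t r ih =>
    intro ans m c
    simp only [solLoop, runs]
    by_cases h : m < t
    · simp [h, ih]
    · simp [h, ih]

-- A's day-building foldl is a map
theorem foldlA_eq_map (xs : List (Int × Int)) : ∀ (acc : List Int),
    xs.foldl
      (fun lst ps =>
        if PySem.Int.mod (100 - ps.1) ps.2 = 0 then lst ++ [PySem.Int.floordiv (100 - ps.1) ps.2]
        else lst ++ [PySem.Int.floordiv (100 - ps.1) ps.2 + 1]) acc
    = acc ++ xs.map (fun ps =>
        if PySem.Int.mod (100 - ps.1) ps.2 = 0 then PySem.Int.floordiv (100 - ps.1) ps.2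
        else PySem.Int.floordiv (100 - ps.1) ps.2 + 1) := by
  induction xs with
  | nil => intro acc; simp
  | cons x xs ih =>
    intro acc
    simp only [List.foldl, List.map]
    by_cases h : PySem.Int.mod (100 - x.1) x.2 = 0
    · simp [h, ih]
    · simp [h, ih]

-- B's fold invariant: bounds collect gIdx, the counter advances by the length
theorem foldB_inv (r : List Int) : ∀ (b : List Int) (m j : Int),
    ∃ m', r.foldl bStep (b, some m, j) = (b ++ gIdx j m r, some m', j + r.length) := by
  induction r with
  | nil => intro b m j; exact ⟨m, by simp [gIdx]⟩
  | cons t r ih =>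
    intro b m j
    simp only [List.foldl, bStep, gIdx]
    by_cases h : t > m
    · rw [if_pos h, if_pos h]
      obtain ⟨m', hm⟩ := ih (b ++ [j]) t (j + 1)
      refine ⟨m', ?_⟩
      rw [hm]
      simp only [Prod.mk.injEq, List.append_assoc, List.singleton_append, List.length_cons,
        true_and]
      omega
    · rw [if_neg h, if_neg h]
      obtain ⟨m', hm⟩ := ih b m (j + 1)
      refine ⟨m', ?_⟩
      rw [hm]
      simp only [Prod.mk.injEq, List.length_cons, true_and]
      omega

theorem boundsDiffs_cons (a b : Int) (l : List Int) :
    boundsDiffs (a :: b :: l) = (b - a) :: boundsDiffs (b :: l) := by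
  simp [boundsDiffs]

theorem boundsDiffs_gIdx (r : List Int) : ∀ (m i j : Int),
    boundsDiffs (i :: (gIdx j m r ++ [j + r.length])) = runs m (j - i) r := by
  induction r with
  | nil => intro m i j; simp [gIdx, boundsDiffs, runs]
  | cons t r ih =>
    intro m i j
    simp only [gIdx, runs]
    by_cases h : m < t
    · rw [if_pos h, if_pos h]
      have he : (i :: ((j :: gIdx (j + 1) t r) ++ [j + ((t :: r).length : Int)]))
           = i :: j :: (gIdx (j + 1) t r ++ [(j + 1) + (r.length : Int)]) := by
        simp; ring
      rw [he, boundsDiffs_cons, ih]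
      simp
    · rw [if_neg h, if_neg h]
      have he : (i :: (gIdx (j + 1) m r ++ [j + ((t :: r).length : Int)]))
           = i :: (gIdx (j + 1) m r ++ [(j + 1) + (r.length : Int)]) := by
        simp; ring
      rw [he, ih]
      congr 1
      ring

-- ===== VERDICT (by name: the statement is the Claim_ definition above) =====
theorem solution_spec : Claim_equal_solution := by
  intro progresses speeds _hdom hpre
  unfold Spec_solution solution solution_alt
  rw [foldlA_eq_map]
  simp only [List.nil_append]
  obtain ⟨hp, hs, _⟩ := hpre
  cases hz : List.zip progresses speeds with
  | nil =>
    exfalso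
    cases progresses with
    | nil => exact hp rfl
    | cons a as => cases speeds with
      | nil => exact hs rfl
      | cons b bs => simp [List.zip] at hz
  | cons q qs =>
    simp only [List.map, List.foldl]
    rw [solLoop_eq_runs]
    simp only [List.nil_append]
    have h0 : bStep ([], none, 0)
        (if PySem.Int.mod (100 - q.1) q.2 = 0 then PySem.Int.floordiv (100 - q.1) q.2
         else PySem.Int.floordiv (100 - q.1) q.2 + 1)
      = ([0], some (if PySem.Int.mod (100 - q.1) q.2 = 0 then PySem.Int.floordiv (100 - q.1) q.2
         else PySem.Int.floordiv (100 - q.1) q.2 + 1), 1) := by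
      simp [bStep]
    rw [h0]
    obtain ⟨m', hm⟩ := foldB_inv
      (qs.map (fun ps =>
        if PySem.Int.mod (100 - ps.1) ps.2 = 0 then PySem.Int.floordiv (100 - ps.1) ps.2
        else PySem.Int.floordiv (100 - ps.1) ps.2 + 1))
      [0]
      (if PySem.Int.mod (100 - q.1) q.2 = 0 then PySem.Int.floordiv (100 - q.1) q.2
       else PySem.Int.floordiv (100 - q.1) q.2 + 1)
      1
    rw [hm]
    unfold altAssemble
    simp only [List.cons_append, List.nil_append]
    rw [boundsDiffs_gIdx]
    norm_num
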